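-- pv_equiv track=rewrite | github.com/MalayBhunia/Smart_Calculator | Calculator.py | next_odd
-- ===== SOURCE A (Python) =====
-- def next_odd(num):
--     try:
--         if type(num)!=int:
--             raise TypeError
--         num+=1
--         while not is_odd(num):
--             num+=1
--         return num
--     except TypeError:
--         return "Input must be an integer."
--
-- def is_odd(num):
--     try:
--         if type(num)!=int:
--             raise ValueError
--         return True if num%2!=0 else False
--     except ValueError:
--         return "Input must be an integer."
-- ===== SOURCE B (Python) =====
-- def next_odd(num):
--     if type(num) != int:
--         return "Input must be an integer."
--     return num + 1 if num % 2 == 0 else num + 2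
-- ===== Notes on version B (the rewrite author's own statement) =====
-- stated objective: simpler
-- what changed: Replaced the increment-until-odd loop and the is_odd helper with a closed-form parity formula that returns the first odd integer greater than num directly.
import Mathlib
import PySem

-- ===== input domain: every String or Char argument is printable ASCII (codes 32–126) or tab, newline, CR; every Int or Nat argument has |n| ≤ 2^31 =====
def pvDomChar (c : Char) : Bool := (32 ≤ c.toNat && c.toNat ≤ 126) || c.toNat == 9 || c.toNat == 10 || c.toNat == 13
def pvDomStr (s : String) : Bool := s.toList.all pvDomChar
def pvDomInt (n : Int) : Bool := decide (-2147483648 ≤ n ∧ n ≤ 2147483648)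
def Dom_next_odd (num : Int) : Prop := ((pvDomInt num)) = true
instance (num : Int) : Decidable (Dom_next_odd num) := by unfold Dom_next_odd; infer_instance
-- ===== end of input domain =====

-- B replaces A's increment-until-odd loop (and its is_odd helper) with a closed-form
-- parity formula; same return value on every int (the TypeError branch
-- is unreachable under the Int signature).

-- ===== PORT A =====
-- is_odd helper of A: on an int it returns True iff num % 2 != 0
def is_odd_A (num : Int) : Bool := PySem.Int.mod num 2 ≠ 0

-- the 'while not is_odd(num): num += 1' loop, entered after the first num += 1
def next_odd_loop (num : Int) : Int :=
  if is_odd_A num then num else next_odd_loop (num + 1)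
termination_by (1 - PySem.Int.mod num 2).toNat
decreasing_by
  simp only [is_odd_A, PySem.Int.mod_eq_emod_of_pos (by norm_num : (0:Int) < 2),
    decide_eq_true_eq, not_not] at *
  omega

def next_odd (num : Int) : Int := next_odd_loop (num + 1)

-- ===== PORT B =====
def next_odd_alt (num : Int) : Int :=
  if PySem.Int.mod num 2 = 0 then num + 1 else num + 2

-- ===== PRECONDITION & SPEC =====
def Spec_next_odd (num : Int) (out : Int) : Prop := out = next_odd_alt num
instance (num : Int) (out : Int) : Decidable (Spec_next_odd num out) := by unfold Spec_next_odd; infer_instance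

-- ===== CLAIM (what is proved, stated in full; the proofs are below) =====
def Claim_equal_next_odd : Prop := ∀ (num : Int), Dom_next_odd num → Spec_next_odd num (next_odd num)

-- ===== LEMMAS AND PROOFS =====
theorem next_odd_loop_odd (n : Int) (h : is_odd_A n = true) : next_odd_loop n = n := by
  unfold next_odd_loop; simp [h]

theorem next_odd_loop_even (n : Int) (h : is_odd_A n = false) :
    next_odd_loop n = next_odd_loop (n + 1) := by
  conv_lhs => unfold next_odd_loop
  simp [h]

-- ===== VERDICT (by name: the statement is the Claim_ definition above) =====
theorem next_odd_spec : Claim_equal_next_odd := by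
  intro num _
  unfold Spec_next_odd next_odd next_odd_alt
  by_cases h : PySem.Int.mod num 2 = 0
  · have h1 : is_odd_A (num + 1) = true := by
      simp only [is_odd_A, PySem.Int.mod_eq_emod_of_pos (by norm_num : (0:Int) < 2),
        decide_eq_true_eq] at *
      omega
    rw [next_odd_loop_odd _ h1, if_pos h]
  · have h1 : is_odd_A (num + 1) = false := by
      simp only [is_odd_A, PySem.Int.mod_eq_emod_of_pos (by norm_num : (0:Int) < 2),
        decide_eq_false_iff_not, not_not] at *
      omega
    have h2 : is_odd_A (num + 2) = true := by
      simp only [is_odd_A, PySem.Int.mod_eq_emod_of_pos (by norm_num : (0:Int) < 2),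
        decide_eq_true_eq] at *
      omega
    rw [next_odd_loop_even _ h1]
    have : num + 1 + 1 = num + 2 := by ring
    rw [this, next_odd_loop_odd _ h2, if_neg h]
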